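-- pv_equiv track=rewrite | github.com/manwar/perlweeklychallenge-club | challenge-303/lubos-kolouch/python/ch-1.py | three_digits_even
-- ===== SOURCE A (Python) =====
-- from collections import Counter
-- from collections.abc import Sequence
--
-- def three_digits_even(ints: Sequence[int]) -> list[int]:
--     """Return all distinct even 3-digit integers formable from the given digits."""
--     if len(ints) < 3:
--         raise ValueError("Need at least 3 digits")
--     if any(d < 0 or d > 9 for d in ints):
--         raise ValueError("Expected digits 0..9")
--
--     counts = Counter(ints)
--     out: set[int] = set()
--
--     for a in range(1, 10):
--         if counts[a] == 0:
--             continue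
--         counts[a] -= 1
--         for b in range(10):
--             if counts[b] == 0:
--                 continue
--             counts[b] -= 1
--             for c in (0, 2, 4, 6, 8):
--                 if counts[c] > 0:
--                     out.add(100 * a + 10 * b + c)
--             counts[b] += 1
--         counts[a] += 1
--
--     return sorted(out)
-- ===== SOURCE B (Python) =====
-- def three_digits_even(ints):
--     """Return all distinct even 3-digit integers formable from the given digits."""
--     if len(ints) < 3:
--         raise ValueError("Need at least 3 digits")
--     if any(d < 0 or d > 9 for d in ints):
--         raise ValueError("Expected digits 0..9")
--
--     out = []
--     for n in range(100, 1000, 2):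
--         digs = (n // 100, n // 10 % 10, n % 10)
--         if all(digs.count(d) <= ints.count(d) for d in digs):
--             out.append(n)
--     return out
-- ===== Notes on version B (the rewrite author's own statement) =====
-- stated objective: alternative
-- what changed: B scans the 450 even numbers 100..998 in increasing order, extracts each candidate's three digits and keeps it when that digit multiset is contained in the input's digit counts, appending to a list that is already sorted and duplicate-free -- no Counter decrement/restore bookkeeping, no set, no final sort.
import Mathlib
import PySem

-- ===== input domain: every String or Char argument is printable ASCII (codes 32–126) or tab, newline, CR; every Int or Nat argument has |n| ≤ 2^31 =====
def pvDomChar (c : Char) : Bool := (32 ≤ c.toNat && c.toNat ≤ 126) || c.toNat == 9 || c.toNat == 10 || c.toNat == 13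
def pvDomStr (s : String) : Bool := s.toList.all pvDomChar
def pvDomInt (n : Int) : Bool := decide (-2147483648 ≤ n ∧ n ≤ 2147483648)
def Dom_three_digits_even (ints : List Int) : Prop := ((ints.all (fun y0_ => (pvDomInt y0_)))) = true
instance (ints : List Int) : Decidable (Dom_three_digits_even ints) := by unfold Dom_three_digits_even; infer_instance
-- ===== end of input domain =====

-- B scans the 450 even candidates 100..998 in increasing order and keeps those whose digit
-- multiset is contained in the input's digit counts, so the output needs no set and no sort;
-- same return value as A's Counter-decrement scan, not claimed faster.

-- ===== PORT A =====
-- The two 'raise ValueError' guards are excluded by Pre_; the port returns [] there (unclaimed).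
def three_digits_even (ints : List Int) : List Int :=
  if ints.length < 3 then []
  else if ints.any (fun d => decide (d < 0) || decide (9 < d)) then []
  else
    let counts := PySem.Dict.counter ints
    let out : PySem.Set Int :=
      (PySem.List.pyRange 1 10 1).foldl (fun out a =>
        if counts.getD a 0 == 0 then out
        else
          -- counts[a] -= 1 … restored by counts[a] += 1 at the end of the iteration
          let counts1 := counts.modify a 0 (· - 1)
          (PySem.List.pyRange 0 10 1).foldl (fun out b =>
            if counts1.getD b 0 == 0 then out
            else
              -- counts[b] -= 1 … restored by counts[b] += 1 at the end of the iteration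
              let counts2 := counts1.modify b 0 (· - 1)
              ([0, 2, 4, 6, 8] : List Int).foldl (fun out c =>
                if counts2.getD c 0 > 0 then PySem.Set.add out (100 * a + 10 * b + c) else out)
                out)
            out)
        PySem.Set.empty
    PySem.List.sorted out (fun x => x) false

-- ===== PORT B =====
def three_digits_even_alt (ints : List Int) : List Int :=
  if ints.length < 3 then []
  else if ints.any (fun d => decide (d < 0) || decide (9 < d)) then []
  else
    (PySem.List.pyRange 100 1000 2).foldl (fun out n =>
      let digs : List Int := [PySem.Int.floordiv n 100,
                             PySem.Int.mod (PySem.Int.floordiv n 10) 10,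
                             PySem.Int.mod n 10]
      if digs.all (fun d => decide (digs.count d ≤ ints.count d)) then out ++ [n] else out)
      []

-- ===== PRECONDITION & SPEC =====
-- Pre_ excludes exactly the inputs on which A (and B) raise ValueError: fewer than 3 digits, or an entry outside 0..9.
def Pre_three_digits_even (ints : List Int) : Prop :=
  3 ≤ ints.length ∧ ∀ d ∈ ints, 0 ≤ d ∧ d ≤ 9
instance (ints : List Int) : Decidable (Pre_three_digits_even ints) := by
  unfold Pre_three_digits_even; infer_instance
def pvWitness_three_digits_even : List Int := [1, 2, 3]
def Spec_three_digits_even (ints : List Int) (out : List Int) : Prop := out = three_digits_even_alt ints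
instance (ints : List Int) (out : List Int) : Decidable (Spec_three_digits_even ints out) := by unfold Spec_three_digits_even; infer_instance

-- ===== CLAIM (what is proved, stated in full; the proofs are below) =====
def Claim_equal_three_digits_even : Prop := ∀ (ints : List Int), Dom_three_digits_even ints → Pre_three_digits_even ints → Spec_three_digits_even ints (three_digits_even ints)

-- ===== LEMMAS AND PROOFS =====

-- membership in a set-accumulating foldl, generic in the per-element contribution Q
theorem mem_foldl_set {α : Type} (Q : α → Int → Prop) (g : PySem.Set Int → α → PySem.Set Int)
    (hg : ∀ s a x, x ∈ g s a ↔ x ∈ s ∨ Q a x) :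
    ∀ (l : List α) (s : PySem.Set Int) (x : Int), x ∈ l.foldl g s ↔ x ∈ s ∨ ∃ a ∈ l, Q a x := by
  intro l
  induction l with
  | nil => simp
  | cons hd tl ih =>
    intro s x
    simp only [List.foldl_cons, ih, hg, List.mem_cons]
    constructor
    · rintro ((h | h) | ⟨a, ha, hq⟩)
      · exact Or.inl h
      · exact Or.inr ⟨hd, Or.inl rfl, h⟩
      · exact Or.inr ⟨a, Or.inr ha, hq⟩
    · rintro (h | ⟨a, (rfl | ha), hq⟩)
      · exact Or.inl (Or.inl h)
      · exact Or.inl (Or.inr hq)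
      · exact Or.inr ⟨a, ha, hq⟩

-- Nodup is preserved by a set-accumulating foldl
theorem nodup_foldl_set {α : Type} (g : PySem.Set Int → α → PySem.Set Int)
    (hg : ∀ s a, s.Nodup → (g s a).Nodup) :
    ∀ (l : List α) (s : PySem.Set Int), s.Nodup → (l.foldl g s).Nodup := by
  intro l
  induction l with
  | nil => intro s h; simpa using h
  | cons hd tl ih => intro s h; exact ih _ (hg _ _ h)

-- the multiset-availability condition shared by the two characterisations
def Avail (ints : List Int) (a b c : Int) : Prop :=
  1 ≤ ints.count a ∧
  (1 + (if b = a then 1 else 0) : Nat) ≤ ints.count b ∧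
  (1 + (if c = a then 1 else 0) + (if c = b then 1 else 0) : Nat) ≤ ints.count c

def Good (ints : List Int) (x : Int) : Prop :=
  ∃ a b c : Int, (1 ≤ a ∧ a ≤ 9) ∧ (0 ≤ b ∧ b ≤ 9) ∧
    (c = 0 ∨ c = 2 ∨ c = 4 ∨ c = 6 ∨ c = 8) ∧ Avail ints a b c ∧ x = 100 * a + 10 * b + c

theorem avail_iff (ints : List Int) (a b c : Int) :
    (¬((ints.count a : Int) = 0) ∧
     ¬((if b = a then (ints.count a : Int) - 1 else (ints.count b : Int)) = 0) ∧
     0 < (if c = b then (if b = a then (ints.count a : Int) - 1 else (ints.count b : Int)) - 1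
          else if c = a then (ints.count a : Int) - 1 else (ints.count c : Int)))
    ↔ Avail ints a b c := by
  unfold Avail
  by_cases hba : b = a
  · by_cases hcb : c = b
    · simp only [hcb, hba, if_true]
      omega
    · simp only [hba] at hcb ⊢
      simp only [if_true, hcb, if_false]
      omega
  · by_cases hcb : c = b
    · simp only [hcb] at hba ⊢
      simp only [if_true, hba, if_false]
      omega
    · by_cases hca : c = a
      · simp only [hca] at hcb ⊢
        simp only [if_true, hba, hcb, if_false]
        omega
      · simp only [hba, hcb, hca, if_false]
        omega

-- membership in A's triple fold, characterised by Good
theorem A_mem (ints : List Int) (x : Int) :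
    (x ∈ (PySem.List.pyRange 1 10 1).foldl (fun out a =>
        if (PySem.Dict.counter ints).getD a 0 == 0 then out
        else ((PySem.List.pyRange 0 10 1).foldl (fun out b =>
          if ((PySem.Dict.counter ints).modify a 0 (· - 1)).getD b 0 == 0 then out
          else (([0, 2, 4, 6, 8] : List Int).foldl (fun out c =>
            if (((PySem.Dict.counter ints).modify a 0 (· - 1)).modify b 0 (· - 1)).getD c 0 > 0
            then PySem.Set.add out (100 * a + 10 * b + c) else out) out)) out)) PySem.Set.empty)
    ↔ Good ints x := by
  rw [mem_foldl_set (Q := fun a x =>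
      ¬((PySem.Dict.counter ints).getD a 0 = 0) ∧
      ∃ b ∈ PySem.List.pyRange 0 10 1,
        ¬(((PySem.Dict.counter ints).modify a 0 (· - 1)).getD b 0 = 0) ∧
        ∃ c ∈ ([0, 2, 4, 6, 8] : List Int),
          0 < (((PySem.Dict.counter ints).modify a 0 (· - 1)).modify b 0 (· - 1)).getD c 0 ∧
          x = 100 * a + 10 * b + c)]
  · have hempty : ∀ y : Int, y ∈ (PySem.Set.empty : PySem.Set Int) ↔ False := by
      simp [PySem.Set.empty]
    have hgc : ∀ v : Int, (PySem.Dict.counter ints).getD v 0 = (ints.count v : Int) := fun v =>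
      PySem.Dict.getD_counter ..
    have h1 : ∀ a b : Int, ((PySem.Dict.counter ints).modify a 0 (· - 1)).getD b 0
        = if b = a then (ints.count a : Int) - 1 else (ints.count b : Int) := by
      intro a b
      rw [PySem.Dict.getD_modify]
      split <;> simp [hgc]
    have h2 : ∀ a b c : Int,
        ((((PySem.Dict.counter ints).modify a 0 (· - 1)).modify b 0 (· - 1)).getD c 0)
        = if c = b then (if b = a then (ints.count a : Int) - 1 else (ints.count b : Int)) - 1
          else if c = a then (ints.count a : Int) - 1 else (ints.count c : Int) := by
      intro a b c
      rw [PySem.Dict.getD_modify]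
      split <;> rw [h1]
    simp only [hempty, false_or, hgc, h1, h2]
    unfold Good
    constructor
    · rintro ⟨a, ha, hA, b, hb, hB, c, hc, hC, rfl⟩
      rw [PySem.List.mem_pyRange_one] at ha hb
      exact ⟨a, b, c, ⟨ha.1, by omega⟩, ⟨hb.1, by omega⟩, by simpa using hc,
        (avail_iff ints a b c).mp ⟨hA, hB, hC⟩, rfl⟩
    · rintro ⟨a, b, c, ⟨ha1, ha2⟩, ⟨hb1, hb2⟩, hc, hav, rfl⟩
      obtain ⟨hA, hB, hC⟩ := (avail_iff ints a b c).mpr hav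
      exact ⟨a, PySem.List.mem_pyRange_one.mpr ⟨ha1, by omega⟩, hA,
        b, PySem.List.mem_pyRange_one.mpr ⟨hb1, by omega⟩, hB,
        c, by simpa using hc, hC, rfl⟩
  · -- hg for the outer fold
    intro s a y
    by_cases hA : (PySem.Dict.counter ints).getD a 0 = 0
    · simp [hA]
    · have hA' : ¬ ints.count a = 0 := by
        intro h
        exact hA (by rw [PySem.Dict.getD_counter, h]; rfl)
      rw [if_neg (by simp [hA'])]
      rw [mem_foldl_set (Q := fun b x =>
          ¬(((PySem.Dict.counter ints).modify a 0 (· - 1)).getD b 0 = 0) ∧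
          ∃ c ∈ ([0, 2, 4, 6, 8] : List Int),
            0 < (((PySem.Dict.counter ints).modify a 0 (· - 1)).modify b 0 (· - 1)).getD c 0 ∧
            x = 100 * a + 10 * b + c)]
      · simp [hA']
      · -- hg for the middle fold
        intro s b y
        by_cases hB : ((PySem.Dict.counter ints).modify a 0 (· - 1)).getD b 0 = 0
        · simp [hB]
        · rw [if_neg (by simp [hB])]
          rw [mem_foldl_set (Q := fun c x =>
              0 < (((PySem.Dict.counter ints).modify a 0 (· - 1)).modify b 0 (· - 1)).getD c 0 ∧
              x = 100 * a + 10 * b + c)]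
          · simp [hB]
          · -- hg for the inner fold
            intro s c y
            by_cases hC :
                0 < (((PySem.Dict.counter ints).modify a 0 (· - 1)).modify b 0 (· - 1)).getD c 0
            · rw [if_pos hC]
              simp [PySem.Set.mem_add, hC]
            · rw [if_neg hC]
              simp [hC]

-- B's per-candidate containment test (the body of B's 'if'), as a Bool predicate
def feasB (ints : List Int) (n : Int) : Bool :=
  let digs : List Int := [PySem.Int.floordiv n 100,
                          PySem.Int.mod (PySem.Int.floordiv n 10) 10,
                          PySem.Int.mod n 10]
  digs.all (fun d => decide (digs.count d ≤ ints.count d))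

-- containment of the digit multiset [a,b,c] in ints equals Avail
theorem feas_iff_avail (ints : List Int) (a b c : Int) :
    (([a, b, c] : List Int).count a ≤ ints.count a ∧
     ([a, b, c] : List Int).count b ≤ ints.count b ∧
     ([a, b, c] : List Int).count c ≤ ints.count c) ↔ Avail ints a b c := by
  unfold Avail
  simp only [List.count_cons, List.count_nil, beq_iff_eq]
  by_cases hba : b = a <;> by_cases hca : c = a <;> by_cases hcb : c = b <;>
    simp only [hba, hca, hcb, if_true, if_false] <;>
    (try split_ifs) <;> omega

-- membership in B's filtered range, characterised by Good
theorem B_mem (ints : List Int) (_hdig : ∀ d ∈ ints, 0 ≤ d ∧ d ≤ 9) (x : Int) :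
    (x ∈ (PySem.List.pyRange 100 1000 2).filter (feasB ints)) ↔ Good ints x := by
  rw [List.mem_filter, PySem.List.mem_pyRange_iff_of_pos (by norm_num)]
  constructor
  · rintro ⟨⟨h100, h1000, hdvd⟩, hfeas⟩
    set a : Int := PySem.Int.floordiv x 100 with ha
    set b : Int := PySem.Int.mod (PySem.Int.floordiv x 10) 10 with hb
    set c : Int := PySem.Int.mod x 10 with hc
    rw [PySem.Int.floordiv_eq_ediv_of_pos (by norm_num)] at ha
    rw [PySem.Int.mod_eq_emod_of_pos (by norm_num),
        PySem.Int.floordiv_eq_ediv_of_pos (by norm_num)] at hb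
    rw [PySem.Int.mod_eq_emod_of_pos (by norm_num)] at hc
    have hx : x = 100 * a + 10 * b + c := by omega
    have hbounds : (1 ≤ a ∧ a ≤ 9) ∧ (0 ≤ b ∧ b ≤ 9) ∧
        (c = 0 ∨ c = 2 ∨ c = 4 ∨ c = 6 ∨ c = 8) := by omega
    unfold feasB at hfeas
    simp only [List.all_eq_true, decide_eq_true_eq, List.mem_cons,
      List.not_mem_nil, or_false] at hfeas
    refine ⟨a, b, c, hbounds.1, hbounds.2.1, hbounds.2.2, ?_, hx⟩
    exact (feas_iff_avail ints a b c).mp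
      ⟨hfeas a (Or.inl rfl), hfeas b (Or.inr (Or.inl rfl)), hfeas c (Or.inr (Or.inr rfl))⟩
  · rintro ⟨a, b, c, ⟨ha1, ha2⟩, ⟨hb1, hb2⟩, hc, hav, rfl⟩
    have hc' : 0 ≤ c ∧ c ≤ 8 ∧ 2 ∣ c := by omega
    refine ⟨⟨by omega, by omega, by omega⟩, ?_⟩
    have hda : PySem.Int.floordiv (100 * a + 10 * b + c) 100 = a := by
      rw [PySem.Int.floordiv_eq_ediv_of_pos (by norm_num)]; omega
    have hdb : PySem.Int.mod (PySem.Int.floordiv (100 * a + 10 * b + c) 10) 10 = b := by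
      rw [PySem.Int.mod_eq_emod_of_pos (by norm_num),
          PySem.Int.floordiv_eq_ediv_of_pos (by norm_num)]
      omega
    have hdc : PySem.Int.mod (100 * a + 10 * b + c) 10 = c := by
      rw [PySem.Int.mod_eq_emod_of_pos (by norm_num)]; omega
    unfold feasB
    simp only [hda, hdb, hdc, List.all_eq_true, decide_eq_true_eq, List.mem_cons,
      List.not_mem_nil, or_false]
    have hfeas := (feas_iff_avail ints a b c).mpr hav
    rintro d (rfl | rfl | rfl)
    · exact hfeas.1
    · exact hfeas.2.1
    · exact hfeas.2.2

-- B's fold is a filter of the candidate range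
theorem B_eq_filter (ints : List Int) :
    ((PySem.List.pyRange 100 1000 2).foldl (fun out n =>
      let digs : List Int := [PySem.Int.floordiv n 100,
                              PySem.Int.mod (PySem.Int.floordiv n 10) 10,
                              PySem.Int.mod n 10]
      if digs.all (fun d => decide (digs.count d ≤ ints.count d)) then out ++ [n] else out)
      ([] : List Int))
    = (PySem.List.pyRange 100 1000 2).filter (feasB ints) := by
  have := PySem.List.foldl_append_if_eq_filter (feasB ints) (PySem.List.pyRange 100 1000 2)
    ([] : List Int)
  simpa [feasB] using this

-- the candidate range, hence also its filter, is strictly increasing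
theorem B_pairwise (ints : List Int) :
    ((PySem.List.pyRange 100 1000 2).filter (feasB ints)).Pairwise (· < ·) := by
  refine List.Pairwise.filter _ ?_
  rw [PySem.List.pyRange_of_pos 100 1000 (by norm_num)]
  rw [List.pairwise_map]
  exact (List.pairwise_lt_range).imp (by intro a b h; omega)

-- ===== VERDICT (by name: the statement is the Claim_ definition above) =====
theorem three_digits_even_spec : Claim_equal_three_digits_even := by
  intro ints _hdom hpre
  obtain ⟨h3, hdig⟩ := hpre
  unfold Spec_three_digits_even three_digits_even three_digits_even_alt
  have hlen : ¬ ints.length < 3 := by omega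
  have hany : ints.any (fun d => decide (d < 0) || decide (9 < d)) = false := by
    rw [List.any_eq_false]
    intro d hd
    have := hdig d hd
    simp
    omega
  rw [if_neg hlen, if_neg (by simp [hany]), if_neg hlen, if_neg (by simp [hany])]
  rw [B_eq_filter ints]
  refine List.Perm.eq_of_pairwise (le := fun a b : Int => a ≤ b)
    (fun a b _ _ hab hba => le_antisymm hab hba)
    (PySem.List.sorted_pairwise _ _) ((B_pairwise ints).imp le_of_lt) ?_
  refine (PySem.List.sorted_perm _ _ _).trans ?_
  rw [List.perm_ext_iff_of_nodup ?nda ?ndb]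
  · intro x
    exact (A_mem ints x).trans (B_mem ints hdig x).symm
  case nda =>
    refine nodup_foldl_set _ ?_ _ _ (by simp [PySem.Set.empty])
    intro s a h
    dsimp only
    split
    · exact h
    · refine nodup_foldl_set _ ?_ _ _ h
      intro s b h
      dsimp only
      split
      · exact h
      · refine nodup_foldl_set _ ?_ _ _ h
        intro s c h
        dsimp only
        split
        · exact PySem.Set.nodup_add _ _ h
        · exact h
  case ndb =>
    exact (B_pairwise ints).imp (fun h => ne_of_lt h)
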